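-- pv_equiv track=rewrite | github.com/UH3135/Study_note | algorithm/stack.py | solution
-- ===== SOURCE A (Python) =====
-- from typing import List
--
-- def solution(n: int, len_list: List[int]):
--     from collections import deque
--
--     stack = deque([])
--
--     for curr in len_list:
--         if not stack:
--             stack.append(curr)
--         else:
--             while stack:
--                 over = stack.pop()
--                 if over > curr:
--                     stack.append(over)
--                     stack.append(curr)
--                     break
--             if not stack:
--                 stack.append(curr)
--     return len(stack)
-- ===== SOURCE B (Python) =====
-- def solution(n, len_list):
--     cur_max = None
--     count = 0
--     for x in reversed(len_list):
--         if cur_max is None or x > cur_max: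
--             count += 1
--             cur_max = x
--     return count
-- ===== Notes on version B (the rewrite author's own statement) =====
-- stated objective: simpler
-- what changed: Replaces the stack with pop-until-greater loops by a single reverse pass counting strict right-to-left maxima with a running maximum.
import Mathlib
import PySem

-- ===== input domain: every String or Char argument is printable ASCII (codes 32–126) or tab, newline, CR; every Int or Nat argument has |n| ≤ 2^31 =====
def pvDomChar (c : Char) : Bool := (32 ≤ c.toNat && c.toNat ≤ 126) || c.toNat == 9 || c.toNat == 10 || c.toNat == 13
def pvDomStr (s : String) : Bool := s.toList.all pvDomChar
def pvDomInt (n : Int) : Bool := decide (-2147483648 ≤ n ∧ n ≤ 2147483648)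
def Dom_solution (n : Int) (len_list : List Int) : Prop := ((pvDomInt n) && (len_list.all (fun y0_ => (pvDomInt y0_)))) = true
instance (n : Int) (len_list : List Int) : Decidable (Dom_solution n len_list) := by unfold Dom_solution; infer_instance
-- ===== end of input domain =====

-- B replaces A's stack (with its pop-until-greater inner loop) by a single reverse
-- pass counting strict right-to-left maxima with a running maximum: simpler.

-- ===== PORT A =====
-- the inner `while stack:` loop: pop `over`; if over > curr, push back `over` then `curr` and stop
def popLoopA (curr : Int) : List Int → List Int
  | [] => []
  | ov :: rest => if ov > curr then curr :: ov :: rest else popLoopA curr rest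

-- one iteration of A's `for curr in len_list` body (stack head = deque's right end)
def stepA (stack : List Int) (curr : Int) : List Int :=
  if stack.isEmpty then curr :: stack
  else
    let s := popLoopA curr stack
    if s.isEmpty then curr :: s else s

def solution (n : Int) (len_list : List Int) : Int :=
  ((len_list.foldl stepA []).length : Int)

-- ===== PORT B =====
-- one iteration of B's loop over reversed(len_list): state = (cur_max, count)
def stepB (st : Option Int × Int) (x : Int) : Option Int × Int :=
  match st.1 with
  | none => (some x, st.2 + 1)
  | some m => if x > m then (some x, st.2 + 1) else st

def solution_alt (n : Int) (len_list : List Int) : Int :=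
  (len_list.reverse.foldl stepB (none, 0)).2

-- ===== PRECONDITION & SPEC =====
def Spec_solution (n : Int) (len_list : List Int) (out : Int) : Prop := out = solution_alt n len_list
instance (n : Int) (len_list : List Int) (out : Int) : Decidable (Spec_solution n len_list out) := by unfold Spec_solution; infer_instance

-- ===== CLAIM (what is proved, stated in full; the proofs are below) =====
def Claim_equal_solution : Prop := ∀ (n : Int) (len_list : List Int), Dom_solution n len_list → Spec_solution n len_list (solution n len_list)

-- ===== LEMMAS AND PROOFS =====

-- maximum of a list, cons-recursively
def pvMax : List Int → Option Int
  | [] => none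
  | x :: xs => some (match pvMax xs with | none => x | some m => max x m)

-- the strict right-to-left maxima of a list, latest first (A's final stack, head = top)
def pvT : List Int → List Int
  | [] => []
  | x :: xs => match pvMax xs with
    | none => [x]
    | some m => if m < x then pvT xs ++ [x] else pvT xs

-- "a exceeds every element of xs", as a Bool predicate via pvMax
def pvP (xs : List Int) (a : Int) : Bool :=
  match pvMax xs with | none => true | some m => decide (m < a)

theorem pvMax_eq_none {xs : List Int} (h : pvMax xs = none) : xs = [] := by
  cases xs with
  | nil => rfl
  | cons x t => simp [pvMax] at h

theorem popLoopA_eq (curr : Int) (s : List Int) :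
    popLoopA curr s =
      if (s.dropWhile (fun a => decide (a ≤ curr))).isEmpty then []
      else curr :: s.dropWhile (fun a => decide (a ≤ curr)) := by
  induction s with
  | nil => simp [popLoopA]
  | cons a t ih =>
    by_cases h : a ≤ curr
    · simpa [popLoopA, List.dropWhile, h, not_lt.mpr h] using ih
    · simp [popLoopA, List.dropWhile, h, lt_of_not_ge h]

theorem stepA_eq (stack : List Int) (curr : Int) :
    stepA stack curr = curr :: stack.dropWhile (fun a => decide (a ≤ curr)) := by
  cases stack with
  | nil => simp [stepA]
  | cons a t =>
    simp only [stepA, List.isEmpty_cons, popLoopA_eq]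
    by_cases h : ((a :: t).dropWhile (fun a => decide (a ≤ curr))).isEmpty
    · simp [List.isEmpty_iff.mp h]
    · simp [h]

theorem dropWhile_eq_filter (x : Int) (acc : List Int) (h : acc.Pairwise (· < ·)) :
    acc.dropWhile (fun a => decide (a ≤ x)) = acc.filter (fun a => decide (x < a)) := by
  induction acc with
  | nil => rfl
  | cons a t ih =>
    rcases List.pairwise_cons.mp h with ⟨ha, ht⟩
    by_cases hax : a ≤ x
    · simp [List.dropWhile, List.filter, hax, not_lt.mpr hax, ih ht]
    · have hxa : x < a := lt_of_not_ge hax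
      have : t.filter (fun b => decide (x < b)) = t :=
        List.filter_eq_self.mpr (fun b hb => by simp [lt_trans hxa (ha b hb)])
      simp [List.dropWhile, List.filter, hxa, not_le.mpr hxa, this]

theorem pairwise_stepA (x : Int) (acc : List Int) (h : acc.Pairwise (· < ·)) :
    (x :: acc.filter (fun a => decide (x < a))).Pairwise (· < ·) := by
  refine List.pairwise_cons.mpr ⟨?_, h.filter _⟩
  intro b hb
  have := List.of_mem_filter hb
  simpa using this

theorem foldl_stepA_eq (xs : List Int) : ∀ (acc : List Int), acc.Pairwise (· < ·) →
    List.foldl stepA acc xs = pvT xs ++ acc.filter (pvP xs) := by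
  induction xs with
  | nil =>
    intro acc _
    have h1 : pvP ([] : List Int) = fun _ => true := funext fun a => by simp [pvP, pvMax]
    simp [pvT, h1]
  | cons x xs ih =>
    intro acc h
    have hstep : stepA acc x = x :: acc.filter (fun a => decide (x < a)) := by
      rw [stepA_eq, dropWhile_eq_filter x acc h]
    have hpw := pairwise_stepA x acc h
    calc List.foldl stepA acc (x :: xs)
        = List.foldl stepA (x :: acc.filter (fun a => decide (x < a))) xs := by
          simp [List.foldl_cons, hstep]
      _ = pvT xs ++ (x :: acc.filter (fun a => decide (x < a))).filter (pvP xs) := ih _ hpw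
      _ = pvT (x :: xs) ++ acc.filter (pvP (x :: xs)) := by
          cases hm : pvMax xs with
          | none =>
            have hxs : xs = [] := pvMax_eq_none hm
            subst hxs
            have h1 : pvP ([] : List Int) = fun _ => true := funext fun a => by simp [pvP, pvMax]
            have h2 : pvP [x] = fun a => decide (x < a) := funext fun a => by simp [pvP, pvMax]
            simp [pvT, pvMax, h1, h2]
          | some m =>
            have h0 : pvP xs = fun a => decide (m < a) := funext fun a => by simp [pvP, hm]
            have h2 : pvP (x :: xs) = fun a => decide (max x m < a) :=
              funext fun a => by simp [pvP, pvMax, hm]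
            rw [h0, h2, List.filter_cons]
            by_cases hmx : m < x
            · have hfc : (acc.filter (fun a => decide (x < a))).filter (fun a => decide (m < a))
                  = acc.filter (fun a => decide (x < a)) :=
                List.filter_eq_self.mpr (fun a ha => by
                  have := List.of_mem_filter ha; simp at this ⊢; omega)
              rw [max_eq_left hmx.le]
              simp [pvT, hm, hmx, hfc]
            · have hxm : x ≤ m := not_lt.mp hmx
              have hfc : (acc.filter (fun a => decide (x < a))).filter (fun a => decide (m < a))
                  = acc.filter (fun a => decide (m < a)) := by
                rw [List.filter_filter]
                refine List.filter_congr (fun a _ => ?_)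
                by_cases hma : m < a
                · simp [hma, lt_of_le_of_lt hxm hma]
                · simp [hma]
              rw [max_eq_right hxm]
              simp [pvT, hm, hmx, hfc]

theorem foldr_stepB_eq (l : List Int) :
    l.foldr (fun x st => stepB st x) (none, 0) = (pvMax l, ((pvT l).length : Int)) := by
  induction l with
  | nil => simp [pvT, pvMax]
  | cons x xs ih =>
    rw [List.foldr_cons, ih]
    cases hm : pvMax xs with
    | none =>
      have hxs : xs = [] := pvMax_eq_none hm
      subst hxs
      simp [stepB, pvMax, pvT]
    | some m =>
      by_cases hmx : m < x
      · simp [stepB, pvMax, pvT, hm, hmx, max_eq_left (le_of_lt hmx)]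
      · simp [stepB, pvMax, pvT, hm, hmx, not_lt.mp hmx]

-- ===== VERDICT (by name: the statement is the Claim_ definition above) =====
theorem solution_spec : Claim_equal_solution := by
  intro n len_list _
  show solution n len_list = solution_alt n len_list
  unfold solution solution_alt
  rw [List.foldl_reverse]
  have hA := foldl_stepA_eq len_list [] List.Pairwise.nil
  simp only [List.filter_nil, List.append_nil] at hA
  rw [hA]
  rw [foldr_stepB_eq len_list]
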